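-- pv_equiv track=rewrite | github.com/proycon/anavec | anavec.py | anahash
-- ===== SOURCE A (Python) =====
-- UNKFEATURE = -1
--
-- PUNCTFEATURE = -2
--
-- def anahash(word, alphabetmap, numfeatures):
--     hashvalue = 0
--     for char in word:
--         if not char.isalnum():
--             charvalue = 100 + numfeatures + PUNCTFEATURE
--         elif char in alphabetmap:
--             charvalue = 100 + alphabetmap[char]
--         else:
--             charvalue = 100 + numfeatures + UNKFEATURE
--         hashvalue += charvalue**5
--     return hashvalue
-- ===== SOURCE B (Python) =====
-- UNKFEATURE = -1
--
-- PUNCTFEATURE = -2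
--
-- def anahash(word, alphabetmap, numfeatures):
--     punct = (98 + numfeatures) ** 5
--     unk = (99 + numfeatures) ** 5
--     total = 0
--     for char in sorted(set(word)):
--         n = word.count(char)
--         if char.isalnum():
--             v = alphabetmap.get(char)
--             total += n * ((100 + v) ** 5 if v is not None else unk)
--         else:
--             total += n * punct
--     return total
-- ===== Notes on version B (the rewrite author's own statement) =====
-- stated objective: faster
-- what changed: B iterates over the sorted set of distinct characters, multiplying each character's occurrence count (word.count) by its fifth-power value with hoisted punctuation/unknown constants and an inverted isalnum/dict.get branch, instead of A's per-occurrence accumulation.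
import Mathlib
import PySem

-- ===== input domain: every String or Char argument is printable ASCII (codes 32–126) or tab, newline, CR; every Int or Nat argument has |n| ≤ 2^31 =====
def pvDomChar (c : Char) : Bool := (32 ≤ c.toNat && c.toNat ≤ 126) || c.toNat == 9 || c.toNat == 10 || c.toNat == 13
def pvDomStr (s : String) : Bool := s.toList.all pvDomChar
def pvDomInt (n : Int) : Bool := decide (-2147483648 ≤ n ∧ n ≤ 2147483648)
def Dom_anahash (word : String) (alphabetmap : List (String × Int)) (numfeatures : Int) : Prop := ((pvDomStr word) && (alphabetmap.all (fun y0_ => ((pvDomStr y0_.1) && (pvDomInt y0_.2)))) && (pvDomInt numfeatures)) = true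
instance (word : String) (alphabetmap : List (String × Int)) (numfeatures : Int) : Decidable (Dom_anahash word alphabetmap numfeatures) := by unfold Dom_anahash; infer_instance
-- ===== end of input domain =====

-- B iterates over the sorted set of distinct characters, weighting each fifth-power value
-- by its occurrence count (with hoisted punct/unknown constants and an inverted branch),
-- instead of A's per-occurrence accumulation; equal because addition commutes.

-- ===== PORT A =====
-- per-character value: A's 'if not char.isalnum() / elif char in alphabetmap / else' chain
def pvCharval (c : Char) (alphabetmap : List (String × Int)) (numfeatures : Int) : Int :=
  if !(PySem.Chars.isalnum c) then 100 + numfeatures + (-2)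
  else
    match alphabetmap.find? (fun p => p.1 == c.toString) with
    | some p => 100 + p.2
    | none => 100 + numfeatures + (-1)

def anahash (word : String) (alphabetmap : List (String × Int)) (numfeatures : Int) : Int :=
  word.toList.foldl (fun hashvalue c => hashvalue + (pvCharval c alphabetmap numfeatures) ^ 5) 0

-- ===== PORT B =====
def anahash_alt (word : String) (alphabetmap : List (String × Int)) (numfeatures : Int) : Int :=
  let punct : Int := (98 + numfeatures) ^ 5
  let unk : Int := (99 + numfeatures) ^ 5
  (PySem.List.sorted (PySem.Set.ofList word.toList) (fun c => c) false).foldl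
    (fun total c =>
      let n : Int := (PySem.Str.count word c.toString : Int)
      total + n *
        (if PySem.Chars.isalnum c then
           ((alphabetmap.find? (fun q => q.1 == c.toString)).map
             (fun q => (100 + q.2) ^ 5)).getD unk
         else punct)) 0

-- ===== PRECONDITION & SPEC =====
def Spec_anahash (word : String) (alphabetmap : List (String × Int)) (numfeatures : Int) (out : Int) : Prop := out = anahash_alt word alphabetmap numfeatures
instance (word : String) (alphabetmap : List (String × Int)) (numfeatures : Int) (out : Int) : Decidable (Spec_anahash word alphabetmap numfeatures out) := by unfold Spec_anahash; infer_instance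

-- ===== CLAIM =====
def Claim_equal_anahash : Prop := ∀ (word : String) (alphabetmap : List (String × Int)) (numfeatures : Int), Dom_anahash word alphabetmap numfeatures → Spec_anahash word alphabetmap numfeatures (anahash word alphabetmap numfeatures)

-- ===== LEMMAS AND PROOFS =====

-- str.count with a single-character needle is List.count
theorem pv_count_go_single (c : Char) :
    ∀ (fuel : Nat) (l : List Char) (acc : Nat), l.length ≤ fuel →
      PySem.Chars.count.go [c] fuel l acc = acc + l.count c := by
  intro fuel
  induction fuel with
  | zero =>
    intro l acc h
    have : l = [] := List.length_eq_zero_iff.mp (Nat.le_zero.mp h)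
    subst this; simp [PySem.Chars.count.go]
  | succ n ih =>
    intro l acc h
    cases l with
    | nil => simp [PySem.Chars.count.go]
    | cons x t =>
      rw [PySem.Chars.count.go]
      have ht : t.length ≤ n := by simp at h; omega
      by_cases hx : c = x
      · subst hx
        rw [if_pos (by simp [List.isPrefixOf])]
        have hd : List.drop [c].length (c :: t) = t := rfl
        rw [hd, ih t (acc + 1) ht, List.count_cons_self]
        omega
      · rw [if_neg (by simp [List.isPrefixOf, hx])]
        rw [ih t acc ht]
        simp [Ne.symm hx]

theorem pv_count_single (cs : List Char) (c : Char) :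
    PySem.Chars.count cs [c] = cs.count c := by
  unfold PySem.Chars.count
  rw [if_neg (by simp : ¬ ([c].isEmpty = true))]
  simpa using pv_count_go_single c cs.length cs 0 (le_refl _)

-- B's branch value equals A's charvalue, raised to the 5th power
theorem pv_val_eq (c : Char) (alphabetmap : List (String × Int)) (numfeatures : Int) :
    (if PySem.Chars.isalnum c then
       ((alphabetmap.find? (fun q => q.1 == c.toString)).map
         (fun q => (100 + q.2) ^ 5)).getD ((99 + numfeatures) ^ 5)
     else (98 + numfeatures) ^ 5)
    = (pvCharval c alphabetmap numfeatures) ^ 5 := by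
  unfold pvCharval
  cases h : PySem.Chars.isalnum c with
  | false =>
    simp only [Bool.false_eq_true, if_false, Bool.not_false, if_true]
    ring_nf
  | true =>
    simp only [if_true, Bool.not_true, Bool.false_eq_true, if_false]
    cases alphabetmap.find? (fun q => q.1 == c.toString) with
    | none => simp only [Option.map_none, Option.getD_none]; ring_nf
    | some p => simp only [Option.map_some, Option.getD_some]

-- sum over all elements = sum over distinct elements weighted by multiplicity
theorem pv_sum_by_counts (xs : List Char) (f : Char → Int) :
    xs.foldl (fun h c => h + f c) 0
      = (PySem.Set.ofList xs).foldl (fun t c => t + (xs.count c : Int) * f c) 0 := by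
  rw [PySem.List.foldl_add, PySem.List.foldl_add]
  simp only [zero_add]
  rw [← PySem.List.dedup_eq_ofList]
  have hnd : (PySem.List.dedup xs).Nodup := PySem.List.nodup_dedup xs
  have htf : (PySem.List.dedup xs).toFinset = xs.toFinset := by
    apply Finset.ext; intro a
    simp [List.mem_toFinset]
  calc (xs.map f).sum
      = ∑ m ∈ xs.toFinset, xs.count m • f m := Finset.sum_list_map_count xs f
    _ = ∑ m ∈ (PySem.List.dedup xs).toFinset, (xs.count m : Int) * f m := by
        rw [htf]; refine Finset.sum_congr rfl ?_; intro m _; simp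
    _ = ((PySem.List.dedup xs).map (fun c => (xs.count c : Int) * f c)).sum :=
        List.sum_toFinset _ hnd

-- ===== VERDICT =====
theorem anahash_spec : Claim_equal_anahash := by
  intro word alphabetmap numfeatures _
  show anahash word alphabetmap numfeatures = anahash_alt word alphabetmap numfeatures
  unfold anahash anahash_alt
  rw [pv_sum_by_counts word.toList (fun c => (pvCharval c alphabetmap numfeatures) ^ 5)]
  rw [PySem.List.foldl_add, PySem.List.foldl_add]
  congr 1
  have hperm : (PySem.List.sorted (PySem.Set.ofList word.toList) (fun c => c) false).Perm
      (PySem.Set.ofList word.toList) := PySem.List.sorted_perm _ _ _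
  have hmap : (PySem.List.sorted (PySem.Set.ofList word.toList) (fun c => c) false).map
      (fun c => ((PySem.Str.count word c.toString : Int)) *
        (if PySem.Chars.isalnum c then
           ((alphabetmap.find? (fun q => q.1 == c.toString)).map
             (fun q => (100 + q.2) ^ 5)).getD ((99 + numfeatures) ^ 5)
         else (98 + numfeatures) ^ 5))
      = (PySem.List.sorted (PySem.Set.ofList word.toList) (fun c => c) false).map
        (fun c => (word.toList.count c : Int) * (pvCharval c alphabetmap numfeatures) ^ 5) := by
    apply List.map_congr_left
    intro c _
    have htl : (c.toString).toList = [c] := by simp [Char.toString]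
    rw [pv_val_eq, PySem.Str.count_eq, htl, pv_count_single]
  rw [hmap,
    (hperm.map (fun c => (word.toList.count c : Int) * (pvCharval c alphabetmap numfeatures) ^ 5)).sum_eq]
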